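-- pv_equiv track=rewrite | github.com/tflynn/prolixpy | prolix/steno.py | get_ord_range
-- ===== SOURCE A (Python) =====
-- def get_ord_range(text):
--     """
--     Get the minimum and maximum ordinal values in a string
--
--     :param str text: text to evaluate
--     :return: (min ord, max ord)
--     :rtype: tuple(int, int)
--     """
--     min_ord = 32
--     max_ord = 0
--
--     for ch in text:
--         ord_val = ord(ch)
--         if ord_val < min_ord:
--             min_ord = ord_val
--         if ord_val > max_ord:
--             max_ord = ord_val
--
--     return (min_ord, max_ord)
-- ===== SOURCE B (Python) =====
-- def get_ord_range(text):
--     codes = sorted(map(ord, text))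
--     if not codes:
--         return (32, 0)
--     return (min(32, codes[0]), max(0, codes[-1]))
-- ===== Notes on version B (the rewrite author's own statement) =====
-- stated objective: alternative
-- what changed: Replaces A's single-pass loop with manual running min/max by sorting the ordinals and clamping the two endpoints of the sorted list (min(32, first), max(0, last)), with the empty case handled explicitly.
import Mathlib
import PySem

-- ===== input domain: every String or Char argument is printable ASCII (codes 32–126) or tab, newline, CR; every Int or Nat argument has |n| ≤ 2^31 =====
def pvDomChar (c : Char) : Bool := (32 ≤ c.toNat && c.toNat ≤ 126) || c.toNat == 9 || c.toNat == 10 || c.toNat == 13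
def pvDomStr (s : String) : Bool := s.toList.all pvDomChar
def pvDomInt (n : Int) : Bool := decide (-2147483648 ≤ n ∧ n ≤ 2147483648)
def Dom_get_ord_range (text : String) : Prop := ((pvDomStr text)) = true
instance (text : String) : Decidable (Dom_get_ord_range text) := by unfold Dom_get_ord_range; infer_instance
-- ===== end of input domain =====

-- ===== PORT A =====
-- B sorts the ordinals and clamps the two endpoints of the sorted list instead of A's single fused loop (objective: alternative).
def get_ord_range (text : String) : Int × Int :=
  text.toList.foldl (fun st ch =>
    let ord_val : Int := ch.toNat
    let min_ord := if ord_val < st.1 then ord_val else st.1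
    let max_ord := if ord_val > st.2 then ord_val else st.2
    (min_ord, max_ord)) ((32 : Int), (0 : Int))

-- ===== PORT B =====
def get_ord_range_alt (text : String) : Int × Int :=
  let codes : List Int := PySem.List.sorted (text.toList.map (fun ch => (ch.toNat : Int))) (fun x => x) false
  match codes with
  | [] => (32, 0)
  | m :: t => (min 32 m, max 0 (t.getLastD m))   -- codes[0] and codes[-1] of the nonempty sorted list

-- ===== PRECONDITION & SPEC =====
def Spec_get_ord_range (text : String) (out : Int × Int) : Prop := out = get_ord_range_alt text
instance (text : String) (out : Int × Int) : Decidable (Spec_get_ord_range text out) := by unfold Spec_get_ord_range; infer_instance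

-- ===== CLAIM (what is proved, stated in full; the proofs are below) =====
def Claim_equal_get_ord_range : Prop := ∀ (text : String), Dom_get_ord_range text → Spec_get_ord_range text (get_ord_range text)

-- ===== LEMMAS AND PROOFS =====

-- A's fused loop computes the two separate min/max folds over the ordinal list.
lemma ord_fold_eq (l : List Char) (a b : Int) :
    l.foldl (fun st ch =>
      let ord_val : Int := ch.toNat
      let min_ord := if ord_val < st.1 then ord_val else st.1
      let max_ord := if ord_val > st.2 then ord_val else st.2
      (min_ord, max_ord)) (a, b)
    = ((l.map (fun ch => (ch.toNat : Int))).foldl min a,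
       (l.map (fun ch => (ch.toNat : Int))).foldl max b) := by
  induction l generalizing a b with
  | nil => simp
  | cons c t ih =>
      simp only [List.foldl_cons, List.map_cons]
      rw [ih]
      congr 1 <;> [congr 1; congr 1] <;> simp [min_def, max_def] <;> omega

lemma foldl_min_fix (t : List Int) (b : Int) (h : ∀ x ∈ t, b ≤ x) : t.foldl min b = b := by
  induction t with
  | nil => rfl
  | cons x t ih =>
      have hb : min b x = b := min_eq_left (h x (by simp))
      simp only [List.foldl_cons, hb]
      exact ih (fun y hy => h y (by simp [hy]))

lemma foldl_max_sorted (t : List Int) : ∀ (m b : Int), (m :: t).Pairwise (· ≤ ·) →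
    t.foldl max (max b m) = max b (t.getLastD m) := by
  induction t with
  | nil => intro m b _; rfl
  | cons y ys ih =>
      intro m b hpw
      have hmy : m ≤ y := (List.pairwise_cons.mp hpw).1 y (by simp)
      have hpw' : (y :: ys).Pairwise (· ≤ ·) := (List.pairwise_cons.mp hpw).2
      simp only [List.foldl_cons, List.getLastD_cons]
      rw [max_assoc, max_eq_right hmy]
      exact ih y b hpw'

-- ===== VERDICT (by name: the statement is the Claim_ definition above) =====
theorem get_ord_range_spec : Claim_equal_get_ord_range := by
  intro text _
  unfold Spec_get_ord_range get_ord_range get_ord_range_alt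
  set ords : List Int := text.toList.map (fun ch => (ch.toNat : Int)) with hords
  rw [ord_fold_eq]
  rw [← hords]
  set c : List Int := PySem.List.sorted ords (fun x => x) false with hc
  have hperm : c.Perm ords := PySem.List.sorted_perm ..
  have hpw : c.Pairwise (· ≤ ·) := by
    have := PySem.List.sorted_pairwise (xs := ords) (key := fun x => x)
    simpa [hc] using this
  have hminc : ords.foldl min 32 = c.foldl min 32 :=
    (@List.Perm.foldl_eq _ _ min _ _ ⟨fun a x y => min_right_comm a x y⟩ hperm 32).symm
  have hmaxc : ords.foldl max 0 = c.foldl max 0 :=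
    (@List.Perm.foldl_eq _ _ max _ _ ⟨fun a x y => max_right_comm a x y⟩ hperm 0).symm
  match hm : c with
  | [] =>
      have hords_nil : ords = [] := hperm.symm.eq_nil
      simp [hords_nil]
  | m :: t =>
      have hmle : ∀ x ∈ t, m ≤ x := (List.pairwise_cons.mp hpw).1
      have h1 : List.foldl min 32 (m :: t) = min 32 m := by
        simp only [List.foldl_cons]
        exact foldl_min_fix t (min 32 m) (fun x hx => le_trans (min_le_right _ _) (hmle x hx))
      have h2 : List.foldl max 0 (m :: t) = max 0 (t.getLastD m) := by
        simp only [List.foldl_cons]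
        exact foldl_max_sorted t m 0 hpw
      rw [hminc, hmaxc, h1, h2]
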